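-- pv_equiv track=rewrite | github.com/BrianPugh/cyclopts | cyclopts/sphinx_ext.py | _process_rst_content
-- ===== SOURCE A (Python) =====
-- from typing import TYPE_CHECKING, Any, Dict, List
--
-- def _process_rst_content(content: str, skip_title: bool = False) -> List[str]:
--     """Process RST content to remove problematic elements."""
--     lines = content.splitlines()
--     processed = []
--     i = 0
--
--     while i < len(lines):
--         line = lines[i]
--
--         # Skip title and underline if requested
--         if skip_title and i == 0 and line.strip() and i + 1 < len(lines):
--             next_line = lines[i + 1].strip()
--             if next_line and set(next_line) <= {"-", "=", "^", "~", '"'}: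
--                 i += 2
--                 continue
--
--         # Skip .. contents:: directive
--         if line.strip().startswith(".. contents::"):
--             i += 1
--             while i < len(lines) and lines[i].strip() and lines[i][0] in " \t":
--                 i += 1
--             if i < len(lines) and not lines[i].strip():
--                 i += 1
--             continue
--
--         processed.append(line)
--         i += 1
--
--     return processed
-- ===== SOURCE B (Python) =====
-- def _process_rst_content(content: str, skip_title: bool = False):
--     """Single flat pass with an in_contents state flag instead of an index loop with inner skip-loops."""
--     lines = content.splitlines()
--     if skip_title and len(lines) >= 2 and lines[0].strip():
--         underline = lines[1].strip()
--         if underline and set(underline) <= {"-", "=", "^", "~", '"'}: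
--             lines = lines[2:]
--     out = []
--     in_contents = False
--     for line in lines:
--         s = line.strip()
--         if in_contents:
--             if not s:
--                 in_contents = False
--                 continue
--             if line[0] in " \t":
--                 continue
--             in_contents = False
--         if s.startswith(".. contents::"):
--             in_contents = True
--         else:
--             out.append(line)
--     return out
-- ===== Notes on version B (the rewrite author's own statement) =====
-- stated objective: simpler
-- what changed: Replaces the index-driven while loop with nested inner skip loops by a flat single pass over the lines carrying an in_contents boolean state, with the one-off title check hoisted out before the pass.
import Mathlib
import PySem

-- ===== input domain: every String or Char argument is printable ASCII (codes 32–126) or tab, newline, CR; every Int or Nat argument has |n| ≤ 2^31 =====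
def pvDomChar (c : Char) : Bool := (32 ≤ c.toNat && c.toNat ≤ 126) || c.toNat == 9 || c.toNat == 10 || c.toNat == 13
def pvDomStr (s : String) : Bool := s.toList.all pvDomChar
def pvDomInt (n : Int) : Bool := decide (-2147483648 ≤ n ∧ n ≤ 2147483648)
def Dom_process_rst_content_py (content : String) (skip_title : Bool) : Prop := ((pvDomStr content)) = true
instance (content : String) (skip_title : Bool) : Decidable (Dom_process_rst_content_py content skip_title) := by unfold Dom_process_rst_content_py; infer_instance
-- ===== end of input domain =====

-- B replaces A's index-driven while loop with nested inner skip-loops by a flat single pass carrying a boolean state; objective: simpler.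

-- ===== PORT A =====

-- `line[0] in " \t"` (Python string membership on the first character)
def pvHeadWS (l : String) : Bool :=
  match l.toList with
  | c :: _ => c = ' ' || c = '\t'
  | [] => false

-- the title-skip guard of A's first `if` (it can only fire at i = 0)
def pvTitleG (lines : List String) (skip_title : Bool) (i : Nat) : Bool :=
  skip_title && i == 0 && (PySem.Str.strip (lines.getD i "") != "") && decide (i + 1 < lines.length)
    && (PySem.Str.strip (lines.getD (i + 1) "") != "")
    && (PySem.Str.strip (lines.getD (i + 1) "")).toList.all (fun c => c ∈ ['-', '=', '^', '~', '"'])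

-- inner `while i < len(lines) and lines[i].strip() and lines[i][0] in " \t"`
def pvSkipA (lines : List String) (i : Nat) : Nat :=
  if i < lines.length ∧ PySem.Str.strip (lines.getD i "") ≠ "" ∧ pvHeadWS (lines.getD i "") = true then
    pvSkipA lines (i + 1)
  else i
termination_by lines.length - i
decreasing_by omega

-- index after the inner skip loop plus `if i < len(lines) and not lines[i].strip(): i += 1`
def pvAfter (lines : List String) (i : Nat) : Nat :=
  if pvSkipA lines i < lines.length ∧ PySem.Str.strip (lines.getD (pvSkipA lines i) "") = "" then
    pvSkipA lines i + 1
  else pvSkipA lines i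

theorem pvSkipA_ge (lines : List String) (i : Nat) : i ≤ pvSkipA lines i := by
  fun_induction pvSkipA lines i with
  | case1 i h ih => omega
  | case2 i h => omega

theorem pvAfter_ge (lines : List String) (i : Nat) : i ≤ pvAfter lines i := by
  unfold pvAfter
  have := pvSkipA_ge lines i
  split <;> omega

-- A's outer while loop over the index i
def pvLoopA (lines : List String) (skip_title : Bool) (i : Nat) : List String :=
  if h : i < lines.length then
    if pvTitleG lines skip_title i then
      pvLoopA lines skip_title (i + 2)
    else if PySem.Str.startswith (PySem.Str.strip (lines.getD i "")) ".. contents::" then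
      pvLoopA lines skip_title (pvAfter lines (i + 1))
    else
      lines.getD i "" :: pvLoopA lines skip_title (i + 1)
  else []
termination_by lines.length - i
decreasing_by
  · omega
  · have := pvAfter_ge lines (i + 1); omega
  · omega

def process_rst_content_py (content : String) (skip_title : Bool) : List String :=
  pvLoopA (PySem.Str.splitlines content) skip_title 0

-- ===== PORT B =====

-- does the document start with a non-blank title line followed by an underline?
def pvIsTitled (lines : List String) : Bool :=
  match lines with
  | l0 :: l1 :: _ =>
    (PySem.Str.strip l0 != "") && (PySem.Str.strip l1 != "") &&
      (PySem.Str.strip l1).toList.all (fun c => c ∈ ['-', '=', '^', '~', '"'])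
  | _ => false

-- the flat single pass with the in_contents state flag
def pvLoopB : List String → Bool → List String
  | [], _ => []
  | l :: ls, true =>
    if PySem.Str.strip l = "" then pvLoopB ls false
    else if pvHeadWS l = true then pvLoopB ls true
    else if PySem.Str.startswith (PySem.Str.strip l) ".. contents::" = true then pvLoopB ls true
    else l :: pvLoopB ls false
  | l :: ls, false =>
    if PySem.Str.startswith (PySem.Str.strip l) ".. contents::" = true then pvLoopB ls true
    else l :: pvLoopB ls false

def process_rst_content_py_alt (content : String) (skip_title : Bool) : List String :=
  pvLoopB
    (if skip_title && pvIsTitled (PySem.Str.splitlines content) then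
       (PySem.Str.splitlines content).drop 2
     else PySem.Str.splitlines content)
    false

-- ===== PRECONDITION & SPEC =====
def Spec_process_rst_content_py (content : String) (skip_title : Bool) (out : List String) : Prop := out = process_rst_content_py_alt content skip_title
instance (content : String) (skip_title : Bool) (out : List String) : Decidable (Spec_process_rst_content_py content skip_title out) := by unfold Spec_process_rst_content_py; infer_instance

-- ===== CLAIM (what is proved, stated in full; the proofs are below) =====
def Claim_equal_process_rst_content_py : Prop := ∀ (content : String) (skip_title : Bool), Dom_process_rst_content_py content skip_title → Spec_process_rst_content_py content skip_title (process_rst_content_py content skip_title)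

-- ===== LEMMAS AND PROOFS =====

theorem pvTitleG_ne_zero (lines : List String) (st : Bool) (i : Nat) (h : i ≠ 0) :
    pvTitleG lines st i = false := by
  simp [pvTitleG, h]

theorem pvSkipA_pos (lines : List String) (i : Nat)
    (h : i < lines.length ∧ PySem.Str.strip (lines.getD i "") ≠ "" ∧ pvHeadWS (lines.getD i "") = true) :
    pvSkipA lines i = pvSkipA lines (i + 1) := by
  conv_lhs => rw [pvSkipA]
  exact if_pos h

theorem pvSkipA_neg (lines : List String) (i : Nat)
    (h : ¬(i < lines.length ∧ PySem.Str.strip (lines.getD i "") ≠ "" ∧ pvHeadWS (lines.getD i "") = true)) :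
    pvSkipA lines i = i := by
  conv_lhs => rw [pvSkipA]
  exact if_neg h

-- the drop at index i exposes lines[i]
theorem pv_drop_cons (lines : List String) (i : Nat) (h : i < lines.length) :
    lines.drop i = lines.getD i "" :: lines.drop (i + 1) := by
  rw [List.getD_eq_getElem lines "" h]
  exact (List.getElem_cons_drop h).symm

-- a state-true run of B equals A's inner skip (plus one blank line) followed by a state-false run
theorem pvLoopB_true_eq (lines : List String) (i : Nat) :
    pvLoopB (lines.drop i) true = pvLoopB (lines.drop (pvAfter lines i)) false := by
  fun_induction pvSkipA lines i with
  | case1 i h ih =>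
    obtain ⟨hlen, hs, hw⟩ := h
    have e : pvAfter lines i = pvAfter lines (i + 1) := by
      unfold pvAfter
      rw [pvSkipA_pos lines i ⟨hlen, hs, hw⟩]
    rw [pv_drop_cons lines i hlen, e, ← ih]
    simp only [pvLoopB]
    rw [if_neg hs, if_pos hw]
  | case2 i h =>
    have e0 : pvSkipA lines i = i := pvSkipA_neg lines i h
    by_cases hlen : i < lines.length
    · by_cases hs : PySem.Str.strip (lines.getD i "") = ""
      · have e : pvAfter lines i = i + 1 := by
          unfold pvAfter
          rw [e0]
          exact if_pos ⟨hlen, hs⟩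
        rw [pv_drop_cons lines i hlen, e]
        simp only [pvLoopB]
        rw [if_pos hs]
      · have hw : pvHeadWS (lines.getD i "") = false := by
          cases hhw : pvHeadWS (lines.getD i "") with
          | false => rfl
          | true => exact absurd ⟨hlen, hs, hhw⟩ h
        have e : pvAfter lines i = i := by
          unfold pvAfter
          rw [e0]
          exact if_neg (by tauto)
        rw [e, pv_drop_cons lines i hlen]
        simp only [pvLoopB]
        rw [if_neg hs, if_neg (by rw [hw]; simp)]
    · have e : pvAfter lines i = i := by
        unfold pvAfter
        rw [e0]
        exact if_neg (by tauto)
      rw [e, List.drop_eq_nil_of_le (by omega)]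
      rfl

-- A's outer loop from index i (title guard false at i) equals B's state-false pass over the tail
theorem pvLoopA_eq (lines : List String) (st : Bool) (i : Nat)
    (hg : pvTitleG lines st i = false) :
    pvLoopA lines st i = pvLoopB (lines.drop i) false := by
  fun_induction pvLoopA lines st i with
  | case1 i h hgt ih =>
    rw [hg] at hgt
    exact absurd hgt (by simp)
  | case2 i h hgt hsw ih =>
    rw [ih (pvTitleG_ne_zero lines st _ (by have := pvAfter_ge lines (i + 1); omega))]
    rw [pv_drop_cons lines i h]
    simp only [pvLoopB]
    rw [if_pos hsw, pvLoopB_true_eq lines (i + 1)]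
  | case3 i h hgt hsw ih =>
    rw [ih (pvTitleG_ne_zero lines st _ (by omega))]
    rw [pv_drop_cons lines i h]
    simp only [pvLoopB]
    rw [if_neg hsw]
  | case4 i h =>
    rw [List.drop_eq_nil_of_le (by omega)]
    rfl

-- the title guard at index 0 coincides with skip_title && pvIsTitled
theorem pvTitleG_zero (lines : List String) (st : Bool) :
    pvTitleG lines st 0 = (st && pvIsTitled lines) := by
  match lines with
  | [] => simp [pvTitleG, pvIsTitled]
  | [l] => simp [pvTitleG, pvIsTitled]
  | l0 :: l1 :: rest =>
    simp only [pvTitleG, pvIsTitled, List.getD_cons_zero, List.getD_cons_succ]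
    simp [Bool.and_assoc]

-- the whole of A from index 0 equals B's pass over the (possibly title-stripped) lines
theorem pv_main (lines : List String) (st : Bool) :
    pvLoopA lines st 0 = pvLoopB (if st && pvIsTitled lines then lines.drop 2 else lines) false := by
  by_cases hg : pvTitleG lines st 0 = true
  · have hcond : (st && pvIsTitled lines) = true := by rw [← pvTitleG_zero, hg]
    rw [if_pos hcond]
    have hlen : 0 + 1 < lines.length := by
      have hg' := hg
      simp only [pvTitleG, Bool.and_eq_true, decide_eq_true_eq] at hg'
      exact hg'.1.1.2
    conv_lhs => rw [pvLoopA]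
    rw [dif_pos (by omega : 0 < lines.length), if_pos hg]
    exact pvLoopA_eq lines st 2 (pvTitleG_ne_zero lines st 2 (by omega))
  · have hg' : pvTitleG lines st 0 = false := by simpa using hg
    have hcond : (st && pvIsTitled lines) = false := by rw [← pvTitleG_zero, hg']
    rw [if_neg (by simp [hcond])]
    rw [pvLoopA_eq lines st 0 hg', List.drop_zero]

-- ===== VERDICT (by name: the statement is the Claim_ definition above) =====
theorem process_rst_content_py_spec : Claim_equal_process_rst_content_py := by
  intro content skip_title _
  unfold Spec_process_rst_content_py process_rst_content_py process_rst_content_py_alt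
  exact pv_main (PySem.Str.splitlines content) skip_title
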